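-- pv_equiv track=rewrite | github.com/gatto/ds-network-analysis | py/net_building/extract.py | get_unique_max
-- ===== SOURCE A (Python) =====
-- def get_unique_max(scores: dict):
--     my_max = max(scores, key=scores.get)
--     # we need to check that the max is unique
--     cocco = 0
--     for value in scores.values():
--         if value == scores[my_max]:
--             cocco += 1
--     # and now we return, discriminating on whether the max was unique or not
--     if cocco > 1:  # non unique maximum found
--         return None
--     elif cocco == 1:  # unique maximum found
--         return my_max
--     else:  # wut tis
--         raise Exception(f"cocco {cocco}")
-- ===== SOURCE B (Python) =====
-- def get_unique_max(scores: dict):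
--     # one pass: keep the first maximal item and how many times its value occurs
--     best = None
--     count = 0
--     for kv in scores.items():
--         if best is None or kv[1] > best[1]:
--             best, count = kv, 1
--         elif kv[1] == best[1]:
--             count += 1
--     if best is None:
--         raise ValueError("max() arg is an empty sequence")
--     return best[0] if count == 1 else None
-- ===== Notes on version B (the rewrite author's own statement) =====
-- stated objective: alternative
-- what changed: Replaces max(scores, key=scores.get) (which does a dict lookup per key) plus a second full pass over values by a single pass over items() that maintains the first-encountered best item and a multiplicity counter reset on each strict improvement. Pre_ excludes duplicate-key lists, which a Python dict argument cannot represent (dict() collapses them).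
import Mathlib
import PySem

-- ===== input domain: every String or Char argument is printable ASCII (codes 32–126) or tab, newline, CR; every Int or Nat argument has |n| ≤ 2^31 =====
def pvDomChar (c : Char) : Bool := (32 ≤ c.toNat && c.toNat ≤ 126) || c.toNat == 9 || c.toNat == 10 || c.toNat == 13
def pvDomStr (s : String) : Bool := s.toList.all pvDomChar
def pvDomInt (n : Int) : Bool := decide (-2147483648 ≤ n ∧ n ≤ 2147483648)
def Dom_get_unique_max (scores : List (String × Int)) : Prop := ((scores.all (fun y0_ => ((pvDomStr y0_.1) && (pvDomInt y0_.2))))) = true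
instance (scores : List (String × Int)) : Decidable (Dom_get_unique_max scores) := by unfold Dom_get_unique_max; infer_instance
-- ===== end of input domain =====

-- B replaces A's max(scores, key=scores.get) plus a second counting pass by a single
-- pass over the items keeping the first maximal item and a multiplicity counter.

-- ===== PORT A =====
-- scores.get k / scores[k]: first-match association-list lookup (exactly PySem.Dict.get?'s definition)
def pvGetA (scores : List (String × Int)) (k : String) : Option Int :=
  (List.find? (fun p => p.1 == k) scores).map Prod.snd

def get_unique_max (scores : List (String × Int)) : Option String :=
  -- my_max = max(scores, key=scores.get); on a dict the key function always returns the value, so .getD 0 never fires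
  match PySem.List.max? (scores.map Prod.fst) (fun k => (pvGetA scores k).getD 0) with
  | none => none     -- max() on an empty dict raises ValueError; excluded by Pre_
  | some my_max =>
    match pvGetA scores my_max with
    | none => none   -- scores[my_max] KeyError: unreachable, my_max is a key of scores
    | some vm =>
      let cocco : Int := (scores.map Prod.snd).foldl (fun c v => if v = vm then c + 1 else c) 0
      if cocco > 1 then none
      else if cocco = 1 then some my_max
      else none      -- Python: raise Exception(...); unreachable on Pre_ (nonempty dict)

-- ===== PORT B =====
def bestStep (st : Option (String × Int) × Int) (kv : String × Int) : Option (String × Int) × Int :=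
  match st with
  | (none, _) => (some kv, 1)
  | (some (bk, bv), c) =>
    if bv < kv.2 then (some kv, 1)
    else if kv.2 = bv then (some (bk, bv), c + 1)
    else (some (bk, bv), c)

def get_unique_max_alt (scores : List (String × Int)) : Option String :=
  match scores.foldl bestStep (none, 0) with
  | (none, _) => none   -- Python B: raise ValueError on empty; excluded by Pre_
  | (some (bk, _), c) => if c = 1 then some bk else none

-- ===== PRECONDITION & SPEC =====
-- Pre_ excludes the empty dict, on which both Pythons raise ValueError, and lists with
-- duplicate keys, which do not represent a Python dict (dict() collapses them silently).
def Pre_get_unique_max (scores : List (String × Int)) : Prop :=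
  scores ≠ [] ∧ (scores.map Prod.fst).Nodup
instance (scores : List (String × Int)) : Decidable (Pre_get_unique_max scores) := by
  unfold Pre_get_unique_max; infer_instance

def pvWitness_get_unique_max : (List (String × Int)) := [("a", 1), ("b", 2)]

def Spec_get_unique_max (scores : List (String × Int)) (out : Option String) : Prop := out = get_unique_max_alt scores
instance (scores : List (String × Int)) (out : Option String) : Decidable (Spec_get_unique_max scores out) := by unfold Spec_get_unique_max; infer_instance

-- ===== CLAIM (what is proved, stated in full; the proofs are below) =====
def Claim_equal_get_unique_max : Prop := ∀ (scores : List (String × Int)), Dom_get_unique_max scores → Pre_get_unique_max scores → Spec_get_unique_max scores (get_unique_max scores)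

-- ===== LEMMAS AND PROOFS =====

-- running first-maximum on pairs, keyed by the value
def mstep (b : String × Int) (p : String × Int) : String × Int :=
  if b.2 < p.2 then p else b

-- the step of Python's max(keys, key=f) fold (exactly PySem.List.max?'s step)
def astep (f : String → Int) (acc : Option String) (k : String) : Option String :=
  match acc with
  | none => some k
  | some m => if f m < f k then some k else some m

theorem max?_eq_foldl_astep (l : List (String × Int)) (f : String → Int) :
    PySem.List.max? (l.map Prod.fst) f = l.foldl (fun acc p => astep f acc p.1) none := by
  simp only [PySem.List.max?, List.foldl_map]
  congr 1
  funext acc p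
  cases acc <;> rfl

theorem mfold_le (l : List (String × Int)) (b : String × Int) :
    b.2 ≤ (l.foldl mstep b).2 := by
  induction l generalizing b with
  | nil => simp
  | cons p t ih =>
    simp only [List.foldl_cons]
    refine le_trans ?_ (ih (mstep b p))
    unfold mstep; split <;> omega

theorem mfold_mem (l : List (String × Int)) (b : String × Int) :
    l.foldl mstep b = b ∨ l.foldl mstep b ∈ l := by
  induction l generalizing b with
  | nil => simp
  | cons p t ih =>
    simp only [List.foldl_cons]
    rcases ih (mstep b p) with h | h
    · rw [h]; unfold mstep; split
      · right; simp
      · left; rfl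
    · right; simp [h]

-- B's fold, characterised via the running maximum and a countP
theorem bfold (l : List (String × Int)) (bk : String) (bv : Int) (c : Int) :
    l.foldl bestStep (some (bk, bv), c) =
      (some (l.foldl mstep (bk, bv)),
       if bv < (l.foldl mstep (bk, bv)).2
         then (l.countP (fun p => p.2 == (l.foldl mstep (bk, bv)).2) : Int)
         else c + (l.countP (fun p => p.2 == bv) : Int)) := by
  induction l generalizing bk bv c with
  | nil => simp
  | cons p t ih =>
    obtain ⟨pk, pv⟩ := p
    simp only [List.foldl_cons]
    by_cases h1 : bv < pv
    · have hstep : bestStep (some (bk, bv), c) (pk, pv) = (some (pk, pv), 1) := by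
        simp [bestStep, h1]
      have hm : mstep (bk, bv) (pk, pv) = (pk, pv) := by simp [mstep, h1]
      rw [hstep, ih, hm]
      have hle2 : pv ≤ (t.foldl mstep (pk, pv)).2 := mfold_le t (pk, pv)
      by_cases h2 : pv < (t.foldl mstep (pk, pv)).2
      · have hne : (pv == (t.foldl mstep (pk, pv)).2) = false := by simp; omega
        simp [h2, hne, lt_of_lt_of_le h1 hle2]
      · have heq : pv = (t.foldl mstep (pk, pv)).2 := le_antisymm hle2 (by omega)
        simp [List.countP_cons, ← heq]
        omega
    · have hm : mstep (bk, bv) (pk, pv) = (bk, bv) := by simp [mstep, h1]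
      have hle : bv ≤ (t.foldl mstep (bk, bv)).2 := mfold_le t (bk, bv)
      by_cases h2 : pv = bv
      · have hstep : bestStep (some (bk, bv), c) (pk, pv) = (some (bk, bv), c + 1) := by
          simp [bestStep, h2]
        rw [hstep, ih, hm]
        by_cases h3 : bv < (t.foldl mstep (bk, bv)).2
        · have hne : (pv == (t.foldl mstep (bk, bv)).2) = false := by simp; omega
          simp [h3, hne]
        · simp [h3, h2]
          omega
      · have hstep : bestStep (some (bk, bv), c) (pk, pv) = (some (bk, bv), c) := by
          simp [bestStep, h1, h2]
        rw [hstep, ih, hm]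
        by_cases h3 : bv < (t.foldl mstep (bk, bv)).2
        · have hne : (pv == (t.foldl mstep (bk, bv)).2) = false := by simp; omega
          simp [h3, hne]
        · simp [h3, h2]

-- A's max?-fold on the keys, tracked against the running maximum on the pairs
theorem afold (l : List (String × Int)) (f : String → Int) (bk : String) (bv : Int)
    (hb : f bk = bv) (hf : ∀ p ∈ l, f p.1 = p.2) :
    l.foldl (fun acc p => astep f acc p.1) (some bk) = some (l.foldl mstep (bk, bv)).1
    ∧ f (l.foldl mstep (bk, bv)).1 = (l.foldl mstep (bk, bv)).2 := by
  induction l generalizing bk bv with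
  | nil => simpa using hb
  | cons p t ih =>
    obtain ⟨pk, pv⟩ := p
    simp only [List.foldl_cons]
    have hp : f pk = pv := hf (pk, pv) (by simp)
    by_cases h1 : bv < pv
    · have hm : mstep (bk, bv) (pk, pv) = (pk, pv) := by simp [mstep, h1]
      have hs : astep f (some bk) pk = some pk := by simp [astep, hb, hp, h1]
      rw [hm, hs]
      exact ih pk pv hp (fun q hq => hf q (by simp [hq]))
    · have hm : mstep (bk, bv) (pk, pv) = (bk, bv) := by simp [mstep, h1]
      have hs : astep f (some bk) pk = some bk := by simp [astep, hb, hp, h1]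
      rw [hm, hs]
      exact ih bk bv hb (fun q hq => hf q (by simp [hq]))

-- first-match lookup on a duplicate-free association list finds the pair itself
theorem find_nodup (scores : List (String × Int)) (hnd : (scores.map Prod.fst).Nodup)
    (p : String × Int) (hp : p ∈ scores) :
    List.find? (fun q => q.1 == p.1) scores = some p := by
  induction scores with
  | nil => simp at hp
  | cons r t ih =>
    simp only [List.map_cons, List.nodup_cons] at hnd
    rcases List.mem_cons.mp hp with h | h
    · subst h; simp
    · have hne : (r.1 == p.1) = false := by
        simp only [beq_eq_false_iff_ne, ne_eq]
        intro he
        exact hnd.1 (he ▸ List.mem_map.mpr ⟨p, h, rfl⟩)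
      simp [List.find?, hne, ih hnd.2 h]

-- the counting loop over the values is a countP
theorem count_loop (l : List (String × Int)) (vm : Int) (c : Int) :
    (l.map Prod.snd).foldl (fun c v => if v = vm then c + 1 else c) c
      = c + (l.countP (fun p => p.2 == vm) : Int) := by
  induction l generalizing c with
  | nil => simp
  | cons p t ih =>
    simp only [List.map_cons, List.foldl_cons, List.countP_cons]
    by_cases h : p.2 = vm
    · simp only [h, if_true, ih, beq_self_eq_true]
      push_cast; omega
    · simp [h, ih]

-- ===== VERDICT (by name: the statement is the Claim_ definition above) =====
theorem get_unique_max_spec : Claim_equal_get_unique_max := by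
  intro scores _ hPre
  obtain ⟨hne, hnd⟩ := hPre
  unfold Spec_get_unique_max
  cases scores with
  | nil => exact absurd rfl hne
  | cons q rest =>
    obtain ⟨qk, qv⟩ := q
    set f : String → Int := fun k => (pvGetA ((qk, qv) :: rest) k).getD 0 with hfdef
    have hf : ∀ p ∈ (qk, qv) :: rest, f p.1 = p.2 := by
      intro p hp
      simp only [hfdef, pvGetA, find_nodup ((qk, qv) :: rest) hnd p hp,
        Option.map_some, Option.getD_some]
    have hb : f qk = qv := hf (qk, qv) (by simp)
    rcases hMeq : rest.foldl mstep (qk, qv) with ⟨BK, BV⟩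
    have hA := afold rest f qk qv hb (fun p hp => hf p (by simp [hp]))
    rw [hMeq] at hA
    have hMmem : (BK, BV) ∈ (qk, qv) :: rest := by
      rcases mfold_mem rest (qk, qv) with h | h
      · rw [hMeq] at h; rw [← h]; simp
      · rw [hMeq] at h; simp [h]
    have hMle : qv ≤ BV := by have := mfold_le rest (qk, qv); rwa [hMeq] at this
    -- A's max over the keys
    have hmax : PySem.List.max? (((qk, qv) :: rest).map Prod.fst) f = some BK := by
      rw [max?_eq_foldl_astep]
      simp only [List.foldl_cons]
      have h0 : astep f none qk = some qk := rfl
      rw [h0]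
      exact hA.1
    -- A's lookup of the max
    have hget : pvGetA ((qk, qv) :: rest) BK = some BV := by
      simp only [pvGetA, find_nodup ((qk, qv) :: rest) hnd (BK, BV) hMmem,
        Option.map_some]
    -- total count of the maximal value
    have hcnt := count_loop ((qk, qv) :: rest) BV 0
    -- B's fold
    have hB : (((qk, qv) :: rest).foldl bestStep (none, 0))
        = (some (BK, BV), (((qk, qv) :: rest).countP (fun p => p.2 == BV) : Int)) := by
      have h0 : bestStep (none, 0) (qk, qv) = (some (qk, qv), 1) := rfl
      simp only [List.foldl_cons, h0]
      rw [bfold rest qk qv 1, hMeq]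
      by_cases h : qv < BV
      · have hne : (qv == BV) = false := by simp; omega
        simp [h, hne]
      · have heq : qv = BV := le_antisymm hMle (by omega)
        simp [heq]
        omega
    have hpos : 0 < ((qk, qv) :: rest).countP (fun p => p.2 == BV) := by
      refine List.countP_pos_iff.mpr ⟨(BK, BV), hMmem, by simp⟩
    -- assemble
    unfold get_unique_max get_unique_max_alt
    rw [hmax]
    simp only [hget, hB, hcnt, zero_add]
    set n := ((qk, qv) :: rest).countP (fun p => p.2 == BV) with hn
    by_cases h1 : (n : Int) > 1
    · have h2 : ¬ ((n : Int) = 1) := by omega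
      simp [h1, h2]
    · have h2 : (n : Int) = 1 := by omega
      simp [h2]
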